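-- pv_equiv track=rewrite | github.com/sungw00ng/solved | 프로그래머스/Lv. 1/대충 만든 자판.py | solution
-- ===== SOURCE A (Python) =====
-- def solution(keymap, targets):
--     answer = []
--     dic={}
--
--     for key in keymap:
--         for idx,val in enumerate(key):
--             if val in dic:
--                 if dic[val] >= idx+1:
--                     dic[val]=idx+1
--                 else:
--                     pass
--
--             else:
--                 dic[val]=idx+1
--
--     for t in targets:
--         hap=0
--         for idx,val in enumerate(t):
--             if val in dic:
--                 hap+=dic[val]
--             else:
--                 hap=-1
--                 break
--         answer.append(hap)
--
--     return answer
-- ===== SOURCE B (Python) =====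
-- def solution(keymap, targets):
--     cache = {}
--
--     def cost(c):
--         if c in cache:
--             return cache[c]
--         best = -1
--         for key in keymap:
--             i = key.find(c)
--             if i != -1 and (best == -1 or i + 1 < best):
--                 best = i + 1
--         cache[c] = best
--         return best
--
--     answer = []
--     for t in targets:
--         hap = 0
--         for c in t:
--             p = cost(c)
--             if p == -1:
--                 hap = -1
--                 break
--             hap += p
--         answer.append(hap)
--     return answer
-- ===== Notes on version B (the rewrite author's own statement) =====
-- stated objective: alternative
-- what changed: B builds no char-to-min-position index of the keymap: each target character is resolved by scanning the keymap directly with str.find (first occurrence = minimal index within a key) and minimising across keys, memoised per character, so the keymap is traversed on demand per distinct target character instead of being pre-indexed position by position.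
import Mathlib
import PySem

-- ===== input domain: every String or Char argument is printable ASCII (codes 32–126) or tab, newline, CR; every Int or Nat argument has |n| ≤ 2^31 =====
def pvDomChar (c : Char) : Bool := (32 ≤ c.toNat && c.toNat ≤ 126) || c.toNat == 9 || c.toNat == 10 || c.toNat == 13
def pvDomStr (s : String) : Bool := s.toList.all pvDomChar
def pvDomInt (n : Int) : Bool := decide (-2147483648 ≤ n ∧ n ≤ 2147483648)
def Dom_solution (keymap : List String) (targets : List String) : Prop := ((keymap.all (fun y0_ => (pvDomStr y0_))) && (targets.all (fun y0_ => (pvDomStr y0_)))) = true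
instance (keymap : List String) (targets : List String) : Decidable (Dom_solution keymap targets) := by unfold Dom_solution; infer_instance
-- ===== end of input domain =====

-- B is an alternative algorithm: it builds no char→min-position dict; each target character
-- is looked up by scanning the keymap directly with str.find and minimising across keys.


-- ===== PORT A =====
-- one dict update of A's inner keymap loop (the if/else chain verbatim)
def dicStepA (dic : PySem.Dict Char Int) (p : Int × Char) : PySem.Dict Char Int :=
  if dic.contains p.2 then
    (if dic.getD p.2 0 ≥ p.1 + 1 then dic.insert p.2 (p.1 + 1) else dic)
  else dic.insert p.2 (p.1 + 1)

-- A's inner target loop: hap accumulator, break-to(-1) on a missing char.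
-- (dic[val] is guarded by 'val in dic' in A, so getD with default 0 is exact here.)
def solLoopA (d : PySem.Dict Char Int) (hap : Int) : List (Int × Char) → Int
  | [] => hap
  | (_, c) :: rest =>
      if d.contains c then solLoopA d (hap + d.getD c 0) rest else (-1)

def solution (keymap : List String) (targets : List String) : List Int :=
  let dic : PySem.Dict Char Int :=
    keymap.foldl (fun dic key =>
      (PySem.List.enumerate key.toList).foldl dicStepA dic) PySem.Dict.empty
  targets.foldl (fun answer t => answer ++ [solLoopA dic 0 (PySem.List.enumerate t.toList)]) []

-- ===== PORT B =====
-- B's best-update: i = key.find(c); if i != -1 and (best == -1 or i+1 < best): best = i+1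
def bestStep (best : Int) (i : Int) : Int :=
  if i ≠ -1 ∧ (best = -1 ∨ i + 1 < best) then i + 1 else best

-- B's cost(c), miss path: scan the keymap, key.find(c) per key, keep the best (smallest) position
def costB (keymap : List String) (c : Char) : Int :=
  keymap.foldl (fun best key => bestStep best (PySem.Str.find key (String.ofList [c]))) (-1)

-- B's cost(c) with its per-character memo cache (the closure's mutable dict, threaded)
def costM (keymap : List String) (cache : PySem.Dict Char Int) (c : Char) :
    PySem.Dict Char Int × Int :=
  if cache.contains c then (cache, cache.getD c 0)
  else (cache.insert c (costB keymap c), costB keymap c)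

-- B's inner target loop: per-character cost, break-to(-1) when cost is -1
def solLoopB (keymap : List String) (cache : PySem.Dict Char Int) (hap : Int) :
    List Char → PySem.Dict Char Int × Int
  | [] => (cache, hap)
  | c :: rest =>
      match costM keymap cache c with
      | (cache', p) => if p = -1 then (cache', -1) else solLoopB keymap cache' (hap + p) rest

def solution_alt (keymap : List String) (targets : List String) : List Int :=
  (targets.foldl (fun acc t =>
      match solLoopB keymap acc.1 0 t.toList with
      | (cache', r) => (cache', acc.2 ++ [r])) (PySem.Dict.empty, [])).2

-- ===== PRECONDITION & SPEC =====
def Spec_solution (keymap : List String) (targets : List String) (out : List Int) : Prop := out = solution_alt keymap targets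
instance (keymap : List String) (targets : List String) (out : List Int) : Decidable (Spec_solution keymap targets out) := by unfold Spec_solution; infer_instance

-- ===== CLAIM (what is proved, stated in full; the proofs are below) =====
def Claim_equal_solution : Prop := ∀ (keymap : List String) (targets : List String), Dom_solution keymap targets → Spec_solution keymap targets (solution keymap targets)

-- ===== LEMMAS AND PROOFS =====

-- first index of a character, as a plain recursion (proof-side helper)
def fIdx? : List Char → Char → Option Nat
  | [], _ => none
  | a :: t, c => if a = c then some 0 else (fIdx? t c).map Nat.succ

theorem fIdx?_eq_none_iff (cs : List Char) (c : Char) : fIdx? cs c = none ↔ c ∉ cs := by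
  induction cs with
  | nil => simp [fIdx?]
  | cons a t ih =>
      by_cases h : a = c
      · subst h; simp [fIdx?]
      · simp [fIdx?, h, Option.map_eq_none_iff, ih, Ne.symm h]

theorem fIdx?_spec (cs : List Char) (c : Char) (i : Nat) (h : fIdx? cs c = some i) :
    cs[i]? = some c ∧ ∀ j < i, cs[j]? ≠ some c := by
  induction cs generalizing i with
  | nil => simp [fIdx?] at h
  | cons a t ih =>
      by_cases ha : a = c
      · subst ha
        simp [fIdx?] at h
        subst h
        exact ⟨rfl, by omega⟩
      · simp only [fIdx?, ha, if_false, Option.map_eq_some_iff] at h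
        obtain ⟨i', hi', rfl⟩ := h
        obtain ⟨h1, h2⟩ := ih i' hi'
        refine ⟨by simpa using h1, ?_⟩
        intro j hj
        cases j with
        | zero => simpa using ha
        | succ j' => simpa using h2 j' (by omega)

-- [c] is a prefix of l iff l starts with c
theorem singleton_prefix_iff (c : Char) (l : List Char) : [c] <+: l ↔ l.head? = some c := by
  cases l with
  | nil => simp
  | cons a t => simp [List.cons_prefix_cons, eq_comm]

-- Python's key.find(c) for a single character = fIdx?
theorem find_single (cs : List Char) (c : Char) :
    PySem.Chars.find cs [c] = match fIdx? cs c with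
      | none => -1
      | some i => (i : Int) := by
  cases hf : fIdx? cs c with
  | none =>
      have hmem : c ∉ cs := (fIdx?_eq_none_iff cs c).mp hf
      have : ¬ [c] <:+: cs := fun h => hmem (h.sublist.mem (by simp))
      simpa using (PySem.Chars.find_eq_neg_one_iff cs [c]).mpr this
  | some i =>
      obtain ⟨h1, h2⟩ := fIdx?_spec cs c i hf
      have hpre : [c] <+: cs.drop i := by
        rw [singleton_prefix_iff, List.head?_drop, h1]
      have hin : [c] <:+: cs := by
        rw [← PySem.Chars.isIn_iff_infix, ← PySem.Chars.exists_prefix_drop_iff_isIn]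
        exact ⟨i, hpre⟩
      have hnn : 0 ≤ PySem.Chars.find cs [c] := (PySem.Chars.find_nonneg_iff cs [c]).mpr hin
      obtain ⟨hp, hmin⟩ := PySem.Chars.find_spec (s := cs) (sub := [c]) hnn
      have hilt : ¬ i < (PySem.Chars.find cs [c]).toNat := fun hlt => hmin i hlt hpre
      have hgt : ¬ (PySem.Chars.find cs [c]).toNat < i := by
        intro hlt
        have := (singleton_prefix_iff c _).mp hp
        rw [List.head?_drop] at this
        exact h2 _ hlt this
      have : (PySem.Chars.find cs [c]).toNat = i := by omega
      simp only []
      omega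

-- effect of one A-update on one lookup
theorem dicStepA_get (d : PySem.Dict Char Int) (p : Int × Char) (c : Char) :
    (dicStepA d p).get? c =
      if p.2 = c then some (min ((d.get? c).getD (p.1 + 1)) (p.1 + 1)) else d.get? c := by
  have hgd : d.getD p.2 0 = (d.get? p.2).getD 0 := PySem.Dict.getD_eq_get?_getD ..
  unfold dicStepA
  by_cases hc : p.2 = c
  · subst hc
    rw [if_pos rfl]
    cases hget : d.get? p.2 with
    | none =>
        have hmem : d.contains p.2 = false := by
          rw [PySem.Dict.contains_eq_isSome_get?, hget]; rfl
        simp [hmem]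
    | some v =>
        have hmem : d.contains p.2 = true := by
          rw [PySem.Dict.contains_eq_isSome_get?, hget]; rfl
        by_cases hge : v ≥ p.1 + 1
        · simp only [hmem, if_true, hgd, hget, Option.getD_some, hge,
            PySem.Dict.get?_insert]
          congr 1
          omega
        · simp only [hmem, if_true, hgd, hget, Option.getD_some, hge, if_false]
          congr 1
          omega
  · rw [if_neg hc]
    split_ifs <;>
      first
        | rfl
        | (rw [PySem.Dict.get?_insert, if_neg (fun h => hc h.symm)])

-- effect of A's whole inner loop over one key on one lookup
theorem innerA_get (cs : List Char) (s : Int) (d : PySem.Dict Char Int) (c : Char) :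
    ((PySem.List.enumerate cs s).foldl dicStepA d).get? c =
      match fIdx? cs c with
      | none => d.get? c
      | some i => some (min ((d.get? c).getD (s + i + 1)) (s + i + 1)) := by
  induction cs generalizing s d with
  | nil => simp [PySem.List.enumerate_nil, fIdx?]
  | cons a rest ih =>
      rw [PySem.List.enumerate_cons, List.foldl_cons, ih]
      by_cases ha : a = c
      · subst ha
        have hd : (dicStepA d (s, a)).get? a = some (min ((d.get? a).getD (s + 1)) (s + 1)) := by
          rw [dicStepA_get]; simp
        have hfx : fIdx? (a :: rest) a = some 0 := by simp [fIdx?]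
        cases hf : fIdx? rest a with
        | none => simp only [hfx, hd, Nat.cast_zero, add_zero]
        | some i =>
            simp only [hfx, hd, Nat.cast_zero, add_zero, Option.getD_some]
            congr 1
            have hle : min ((d.get? a).getD (s + 1)) (s + 1) ≤ s + 1 := min_le_right ..
            omega
      · have hd : (dicStepA d (s, a)).get? c = d.get? c := by
          rw [dicStepA_get]; simp [ha]
        simp only [fIdx?, if_neg ha, hd]
        cases hf : fIdx? rest c with
        | none => rfl
        | some i =>
            simp only [Option.map_some]
            have hxy : s + ((i + 1 : Nat) : Int) + 1 = s + 1 + (i : Int) + 1 := by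
              push_cast; ring
            rw [show ((Nat.succ i : Nat) : Int) = ((i + 1 : Nat) : Int) from rfl, hxy]

-- relation between A's dict and B's best value, per character, with value positivity
def RelCB (d : PySem.Dict Char Int) (b : Int) (c : Char) : Prop :=
  (d.get? c = none ∧ b = -1) ∨ (∃ v, d.get? c = some v ∧ b = v ∧ 1 ≤ v)

theorem relCB_step (d : PySem.Dict Char Int) (b : Int) (c : Char) (key : String)
    (h : RelCB d b c) :
    RelCB ((PySem.List.enumerate key.toList).foldl dicStepA d)
      (bestStep b (PySem.Str.find key (String.ofList [c]))) c := by
  have hfind : PySem.Str.find key (String.ofList [c]) = PySem.Chars.find key.toList [c] := by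
    simp
  have hget := innerA_get key.toList 0 d c
  cases hf : fIdx? key.toList c with
  | none =>
      simp only [hf] at hget
      have hF : PySem.Str.find key (String.ofList [c]) = -1 := by
        rw [hfind, find_single, hf]
      unfold RelCB at h ⊢
      unfold bestStep
      rw [hF, if_neg (by simp), hget]
      exact h
  | some i =>
      simp only [hf] at hget
      have hF : PySem.Str.find key (String.ofList [c]) = (i : Int) := by
        rw [hfind, find_single, hf]
      unfold RelCB at h ⊢
      unfold bestStep
      rw [hF]
      rcases h with ⟨hn, hb⟩ | ⟨v, hv, hb, hvpos⟩
      · subst hb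
        rw [hn] at hget
        simp only [Option.getD_none, min_self, zero_add] at hget
        rw [if_pos ⟨by omega, Or.inl rfl⟩]
        exact Or.inr ⟨(i : Int) + 1, hget, rfl, by omega⟩
      · rw [hv] at hget
        simp only [Option.getD_some, zero_add] at hget
        by_cases hlt : (i : Int) + 1 < b
        · rw [if_pos ⟨by omega, Or.inr hlt⟩]
          refine Or.inr ⟨(i : Int) + 1, ?_, rfl, by omega⟩
          rw [hget, min_eq_right (by omega)]
        · rw [if_neg (by intro hc; rcases hc.2 with h1 | h1 <;> omega)]
          refine Or.inr ⟨v, ?_, hb, hvpos⟩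
          rw [hget, min_eq_left (by omega)]

theorem relCB_fold (km : List String) (c : Char) (d : PySem.Dict Char Int) (b : Int)
    (h : RelCB d b c) :
    RelCB (km.foldl (fun dic key => (PySem.List.enumerate key.toList).foldl dicStepA dic) d)
      (km.foldl (fun best key => bestStep best (PySem.Str.find key (String.ofList [c]))) b) c := by
  induction km generalizing d b with
  | nil => simpa using h
  | cons key rest ih =>
      simp only [List.foldl_cons]
      exact ih _ _ (relCB_step d b c key h)

theorem relCB_main (km : List String) (c : Char) :
    RelCB (km.foldl (fun dic key => (PySem.List.enumerate key.toList).foldl dicStepA dic)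
            PySem.Dict.empty) (costB km c) c :=
  relCB_fold km c PySem.Dict.empty (-1) (Or.inl ⟨rfl, rfl⟩)

-- every memo entry records the pure cost of its character
def CacheOK (km : List String) (cache : PySem.Dict Char Int) : Prop :=
  ∀ c v, cache.get? c = some v → v = costB km c

theorem costM_spec (km : List String) (cache : PySem.Dict Char Int) (c : Char)
    (h : CacheOK km cache) :
    (costM km cache c).2 = costB km c ∧ CacheOK km (costM km cache c).1 := by
  unfold costM
  by_cases hc : cache.contains c = true
  · obtain ⟨v, hv⟩ : ∃ v, cache.get? c = some v := by
      cases hget : cache.get? c with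
      | none => rw [PySem.Dict.contains_eq_isSome_get?, hget] at hc; simp at hc
      | some v => exact ⟨v, rfl⟩
    have hgd : cache.getD c 0 = v := PySem.Dict.getD_of_get?_eq_some _ 0 hv
    simp only [hc, if_true]
    exact ⟨by rw [hgd]; exact h c v hv, h⟩
  · simp only [hc, Bool.false_eq_true, if_false]
    refine ⟨trivial, ?_⟩
    intro c' v' h'
    rw [PySem.Dict.get?_insert] at h'
    by_cases hcc : c' = c
    · subst hcc
      rw [if_pos rfl] at h'
      cases h'
      rfl
    · rw [if_neg hcc] at h'
      exact h c' v' h'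

-- the two inner target loops agree (and the memo cache stays correct)
theorem loops_eq (km : List String) (cs : List Char) (s hap : Int)
    (cache : PySem.Dict Char Int) (hOK : CacheOK km cache) :
    (solLoopB km cache hap cs).2 =
      solLoopA (km.foldl (fun dic key => (PySem.List.enumerate key.toList).foldl dicStepA dic)
        PySem.Dict.empty) hap (PySem.List.enumerate cs s) ∧
    CacheOK km (solLoopB km cache hap cs).1 := by
  induction cs generalizing s hap cache with
  | nil => exact ⟨by simp [solLoopA, solLoopB, PySem.List.enumerate_nil], hOK⟩
  | cons c rest ih =>
      rw [PySem.List.enumerate_cons]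
      obtain ⟨hcost, hOK'⟩ := costM_spec km cache c hOK
      rcases hp : costM km cache c with ⟨cache', p⟩
      rw [hp] at hcost hOK'
      simp only at hcost hOK'
      rcases relCB_main km c with ⟨hn, hb⟩ | ⟨v, hv, hb, hvpos⟩
      · have hcont : (km.foldl (fun dic key => (PySem.List.enumerate key.toList).foldl dicStepA dic)
            PySem.Dict.empty).contains c = false := by
          rw [PySem.Dict.contains_eq_isSome_get?, hn]; rfl
        have hp1 : p = -1 := by rw [hcost, ← hb]
        simp only [solLoopA, solLoopB, hp, hcont, Bool.false_eq_true, if_false, hp1]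
        exact ⟨rfl, hOK'⟩
      · have hcont : (km.foldl (fun dic key => (PySem.List.enumerate key.toList).foldl dicStepA dic)
            PySem.Dict.empty).contains c = true := by
          rw [PySem.Dict.contains_eq_isSome_get?, hv]; rfl
        have hgd : (km.foldl (fun dic key => (PySem.List.enumerate key.toList).foldl dicStepA dic)
            PySem.Dict.empty).getD c 0 = v := PySem.Dict.getD_of_get?_eq_some _ 0 hv
        have hpv : p = v := by rw [hcost, ← hb]
        simp only [solLoopA, solLoopB, hp, hcont, if_true, hgd, hpv]
        rw [if_neg (by omega)]
        exact ih (s + 1) (hap + v) cache' hOK'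

theorem targets_fold (km : List String) (ts : List String)
    (acc : PySem.Dict Char Int × List Int) (hOK : CacheOK km acc.1) :
    (ts.foldl (fun acc t =>
      match solLoopB km acc.1 0 t.toList with
      | (cache', r) => (cache', acc.2 ++ [r])) acc).2 =
    ts.foldl (fun answer t =>
      answer ++ [solLoopA (km.foldl (fun dic key =>
        (PySem.List.enumerate key.toList).foldl dicStepA dic) PySem.Dict.empty) 0
        (PySem.List.enumerate t.toList)]) acc.2 := by
  induction ts generalizing acc with
  | nil => rfl
  | cons t rest ih =>
      simp only [List.foldl_cons]
      obtain ⟨hval, hOK'⟩ := loops_eq km t.toList 0 0 acc.1 hOK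
      rcases hp : solLoopB km acc.1 0 t.toList with ⟨cache', r⟩
      rw [hp] at hval hOK'
      simp only at hval hOK'
      have := ih (cache', acc.2 ++ [r]) hOK'
      simp only at this
      rw [this, hval]

-- ===== VERDICT (by name: the statement is the Claim_ definition above) =====
theorem solution_spec : Claim_equal_solution := by
  intro keymap targets _
  unfold Spec_solution solution solution_alt
  exact (targets_fold keymap targets (PySem.Dict.empty, []) (fun c v h => by
    simp [PySem.Dict.get?, PySem.Dict.empty] at h)).symm
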